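-- pv_equiv track=rewrite | github.com/TracingInsights/tif1 | src/tif1/validation.py | _coerce_null_like_string_list
-- ===== SOURCE A (Python) =====
-- from typing import Any, TypeVar
--
-- _NULL_LIKE_STRINGS = {"", "none", "null", "nan"}
--
-- def _coerce_null_like_string_list(values: list[Any]) -> list[Any]:
--     """Convert null-like string tokens to None in any list field."""
--     if not values:
--         return values
--
--     normalized: list[Any] = []
--     changed = False
--     for value in values:
--         if isinstance(value, str) and value.strip().lower() in _NULL_LIKE_STRINGS:
--             normalized.append(None)
--             changed = True
--         else:
--             normalized.append(value)
--     return normalized if changed else values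
-- ===== SOURCE B (Python) =====
-- _NULL_LIKE_STRINGS = {"", "none", "null", "nan"}
--
-- def _is_null_like(value):
--     return isinstance(value, str) and value.strip().lower() in _NULL_LIKE_STRINGS
--
-- def _coerce_null_like_string_list(values):
--     """Convert null-like string tokens to None in any list field."""
--     if any(_is_null_like(v) for v in values):
--         return [None if _is_null_like(v) else v for v in values]
--     return values
-- ===== Notes on version B (the rewrite author's own statement) =====
-- stated objective: idiomatic
-- what changed: Detect-then-transform: an any() scan decides whether anything is null-like, and only then a comprehension builds the rewritten list; A's accumulating loop with a changed flag disappears, and the original list object is returned untouched when nothing matches.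
import Mathlib
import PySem

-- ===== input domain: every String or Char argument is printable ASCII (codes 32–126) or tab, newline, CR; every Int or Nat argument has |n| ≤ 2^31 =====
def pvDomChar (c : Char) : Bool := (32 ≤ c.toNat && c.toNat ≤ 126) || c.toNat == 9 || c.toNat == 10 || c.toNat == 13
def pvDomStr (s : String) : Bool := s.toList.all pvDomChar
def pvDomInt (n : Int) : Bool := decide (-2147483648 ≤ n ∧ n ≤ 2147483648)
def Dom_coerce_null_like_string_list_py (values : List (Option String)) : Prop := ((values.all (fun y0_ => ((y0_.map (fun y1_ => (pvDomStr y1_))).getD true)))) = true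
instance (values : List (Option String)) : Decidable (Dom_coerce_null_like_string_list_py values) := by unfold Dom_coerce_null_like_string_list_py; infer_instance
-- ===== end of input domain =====

-- ===== PORT A =====
-- B returns the original list via an any()-guarded comprehension instead of A's accumulating loop with a changed flag (idiomatic rewrite; return-value equivalence).
def pvNullLike (v : Option String) : Bool :=
  match v with
  | some s => (PySem.Str.lower (PySem.Str.strip s)) ∈ ["", "none", "null", "nan"]
  | none => false

def coerce_null_like_string_list_py (values : List (Option String)) : List (Option String) :=
  if values = [] then values
  else
    let st := values.foldl (fun (st : List (Option String) × Bool) value =>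
      if pvNullLike value then (st.1 ++ [none], true) else (st.1 ++ [value], st.2)) ([], false)
    if st.2 then st.1 else values

-- ===== PORT B =====
def coerce_null_like_string_list_py_alt (values : List (Option String)) : List (Option String) :=
  if values.any pvNullLike then
    values.map (fun v => if pvNullLike v then none else v)
  else values

-- ===== PRECONDITION & SPEC =====
def Spec_coerce_null_like_string_list_py (values : List (Option String)) (out : List (Option String)) : Prop := out = coerce_null_like_string_list_py_alt values
instance (values : List (Option String)) (out : List (Option String)) : Decidable (Spec_coerce_null_like_string_list_py values out) := by unfold Spec_coerce_null_like_string_list_py; infer_instance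

-- ===== CLAIM (what is proved, stated in full; the proofs are below) =====
def Claim_equal_coerce_null_like_string_list_py : Prop := ∀ (values : List (Option String)), Dom_coerce_null_like_string_list_py values → Spec_coerce_null_like_string_list_py values (coerce_null_like_string_list_py values)

-- ===== LEMMAS AND PROOFS =====
theorem pvFold_char (vs : List (Option String)) (acc : List (Option String)) (c : Bool) :
    vs.foldl (fun (st : List (Option String) × Bool) value =>
      if pvNullLike value then (st.1 ++ [none], true) else (st.1 ++ [value], st.2)) (acc, c)
    = (acc ++ vs.map (fun v => if pvNullLike v then none else v), c || vs.any pvNullLike) := by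
  induction vs generalizing acc c with
  | nil => simp
  | cons v vs ih =>
    by_cases h : pvNullLike v = true <;>
      simp [h, ih, List.append_assoc]

-- ===== VERDICT (by name: the statement is the Claim_ definition above) =====
theorem coerce_null_like_string_list_py_spec : Claim_equal_coerce_null_like_string_list_py := by
  intro values _
  unfold Spec_coerce_null_like_string_list_py coerce_null_like_string_list_py coerce_null_like_string_list_py_alt
  by_cases he : values = []
  · simp [he]
  · by_cases ha : values.any pvNullLike = true <;> simp [he, pvFold_char, ha]
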